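-- pv_equiv track=rewrite | github.com/daikihi/python-tools-for-me | csv-masking-for-sensitive-information/masking-file.py | _mask_line
-- ===== SOURCE A (Python) =====
-- def _mask_line(line, masking_column):
--     new_line = []
--     i = 0
--     for l in line:
--         if i in masking_column:
--             new_line.append("SAMPLE")
--         else:
--             new_line.append(l)
--         i = i + 1
--     i = 0
--     return new_line
-- ===== SOURCE B (Python) =====
-- def _mask_line(line, masking_column):
--     new_line = list(line)
--     for i in masking_column:
--         if 0 <= i < len(new_line):
--             new_line[i] = "SAMPLE"
--     return new_line
-- ===== Notes on version B (the rewrite author's own statement) =====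
-- stated objective: simpler
-- what changed: B copies the row and overwrites only the masked positions by iterating over masking_column (with a bounds guard), instead of scanning every cell and testing index membership in the list.
import Mathlib
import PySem

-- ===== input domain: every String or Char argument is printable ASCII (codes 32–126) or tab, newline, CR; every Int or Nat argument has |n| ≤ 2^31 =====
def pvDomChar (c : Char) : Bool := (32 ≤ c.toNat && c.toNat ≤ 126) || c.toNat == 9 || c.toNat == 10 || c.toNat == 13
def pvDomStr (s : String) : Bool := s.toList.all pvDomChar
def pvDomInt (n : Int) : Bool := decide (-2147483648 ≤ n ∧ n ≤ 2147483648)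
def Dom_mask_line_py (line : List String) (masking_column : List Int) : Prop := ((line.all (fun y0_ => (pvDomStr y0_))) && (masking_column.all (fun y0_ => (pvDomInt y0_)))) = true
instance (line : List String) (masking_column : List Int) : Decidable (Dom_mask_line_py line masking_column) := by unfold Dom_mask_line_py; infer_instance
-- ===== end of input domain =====

-- B copies the row and overwrites only the masked positions (bounds-guarded) instead of
-- scanning every cell with a membership test; objective: simpler.

-- ===== PORT A =====
-- loop 'for l in line' with counter i, appending "SAMPLE" or l
def maskGoA (masking_column : List Int) : List String → Int → List String
  | [], _ => []
  | l :: rest, i =>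
      (if i ∈ masking_column then "SAMPLE" else l) :: maskGoA masking_column rest (i + 1)

def mask_line_py (line : List String) (masking_column : List Int) : List String :=
  maskGoA masking_column line 0

-- ===== PORT B =====
-- copy, then for each i in masking_column overwrite position i when 0 ≤ i < len
def mask_line_py_alt (line : List String) (masking_column : List Int) : List String :=
  masking_column.foldl
    (fun new_line i =>
      if 0 ≤ i ∧ i < (new_line.length : Int) then new_line.set i.toNat "SAMPLE" else new_line)
    line

-- ===== PRECONDITION & SPEC =====
def Spec_mask_line_py (line : List String) (masking_column : List Int) (out : List String) : Prop := out = mask_line_py_alt line masking_column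
instance (line : List String) (masking_column : List Int) (out : List String) : Decidable (Spec_mask_line_py line masking_column out) := by unfold Spec_mask_line_py; infer_instance

-- ===== CLAIM (what is proved, stated in full; the proofs are below) =====
def Claim_equal_mask_line_py : Prop := ∀ (line : List String) (masking_column : List Int), Dom_mask_line_py line masking_column → Spec_mask_line_py line masking_column (mask_line_py line masking_column)

-- ===== LEMMAS AND PROOFS =====

theorem maskGoA_getElem? (mc : List Int) (xs : List String) (k : Int) (j : Nat) :
    (maskGoA mc xs k)[j]? =
      if (k + (j : Int)) ∈ mc ∧ j < xs.length then some "SAMPLE" else xs[j]? := by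
  induction xs generalizing k j with
  | nil => simp [maskGoA]
  | cons l rest ih =>
    cases j with
    | zero =>
      simp [maskGoA]
      split <;> simp_all
    | succ j' =>
      have h1 : k + ((j' + 1 : Nat) : Int) = k + 1 + (j' : Int) := by push_cast; ring
      simp only [maskGoA, List.getElem?_cons_succ, ih (k + 1) j', List.length_cons, h1,
        Nat.add_lt_add_iff_right]

theorem alt_getElem? (mc : List Int) (xs : List String) (j : Nat) :
    (mask_line_py_alt xs mc)[j]? =
      if ((j : Int)) ∈ mc ∧ j < xs.length then some "SAMPLE" else xs[j]? := by
  induction mc generalizing xs with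
  | nil => simp [mask_line_py_alt]
  | cons i rest ih =>
    have hstep : mask_line_py_alt xs (i :: rest) =
        mask_line_py_alt
          (if 0 ≤ i ∧ i < (xs.length : Int) then xs.set i.toNat "SAMPLE" else xs) rest := by
      unfold mask_line_py_alt; simp
    rw [hstep]
    by_cases hin : 0 ≤ i ∧ i < (xs.length : Int)
    · rw [if_pos hin, ih]
      by_cases hmem : ((j : Int)) ∈ rest
      · by_cases hjl : j < xs.length <;> simp [hmem, hjl]
      · by_cases hij : i = (j : Int)
        · have hnat : i.toNat = j := by omega
          have hjl : j < xs.length := by omega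
          simp [hmem, hnat, hjl]
          exact fun h => absurd hij.symm h
        · have hnat : i.toNat ≠ j := by omega
          simp [hmem, hnat]
          exact fun h _ => absurd h.symm hij
    · rw [if_neg hin, ih]
      by_cases hmem : ((j : Int)) ∈ rest
      · simp [hmem]
      · simp [hmem]
        intro h hl
        exact absurd ⟨by omega, by omega⟩ hin

-- ===== VERDICT (by name: the statement is the Claim_ definition above) =====
theorem mask_line_py_spec : Claim_equal_mask_line_py := by
  intro xs mc _
  unfold Spec_mask_line_py mask_line_py
  apply List.ext_getElem?
  intro j
  rw [maskGoA_getElem? mc xs 0 j, alt_getElem? mc xs j]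
  simp
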